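-- pv_equiv track=rewrite | github.com/aajanki/spacy-fi | lemma/create_lemma_lookup.py | lemma_exceptions
-- ===== SOURCE A (Python) =====
-- def lemma_exceptions(words_with_lemmas, rules):
--     for word, lemmas in words_with_lemmas:
--         found_match = False
--         for rule in rules:
--             if word.endswith(rule[0]):
--                 form = word[:-len(rule[0])] + rule[1]
--                 if form.lower() in lemmas:
--                     found_match = True
--                     break
--
--         if not found_match and word.lower() != lemmas[0]:
--             yield (word, lemmas[0])
-- ===== SOURCE B (Python) =====
-- def lemma_exceptions(words_with_lemmas, rules):
--     by_suffix = {}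
--     for old, new in rules:
--         by_suffix.setdefault(old, set()).add(new)
--     suffix_lens = {len(old) for old, _ in rules}
--
--     def has_match(word, lemmas):
--         n = len(word)
--         for l in suffix_lens:
--             if l <= n:
--                 for new in by_suffix.get(word[n - l:], ()):
--                     if (word[:-l] + new).lower() in lemmas:
--                         return True
--         return False
--
--     return [(word, lemmas[0])
--             for word, lemmas in words_with_lemmas
--             if not has_match(word, lemmas) and word.lower() != lemmas[0]]
-- ===== Notes on version B (the rewrite author's own statement) =====
-- stated objective: faster
-- what changed: B builds, once, a dict from each rule's old suffix to the set of its replacements plus the set of rule-suffix lengths, then for each word probes the dict with one suffix of the word per length, instead of A's inner scan over all rules for every word; the output is built by a comprehension instead of yield.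
import Mathlib
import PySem

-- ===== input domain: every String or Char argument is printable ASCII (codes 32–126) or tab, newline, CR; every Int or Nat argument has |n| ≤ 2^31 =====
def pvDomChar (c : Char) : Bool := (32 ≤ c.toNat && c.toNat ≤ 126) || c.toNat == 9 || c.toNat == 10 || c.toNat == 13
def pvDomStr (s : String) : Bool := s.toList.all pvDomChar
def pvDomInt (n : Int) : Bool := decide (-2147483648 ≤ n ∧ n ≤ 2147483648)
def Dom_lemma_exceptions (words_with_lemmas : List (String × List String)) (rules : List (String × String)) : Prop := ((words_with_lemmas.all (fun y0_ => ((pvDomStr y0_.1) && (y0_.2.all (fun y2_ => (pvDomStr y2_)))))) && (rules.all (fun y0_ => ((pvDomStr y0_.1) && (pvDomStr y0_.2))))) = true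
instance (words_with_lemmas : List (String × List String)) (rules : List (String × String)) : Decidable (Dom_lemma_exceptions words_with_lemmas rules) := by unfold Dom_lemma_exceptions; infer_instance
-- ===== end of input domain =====

-- B replaces A's inner scan over all rules by a dict keyed on the rule's old suffix, probed once per rule-suffix length (objective: faster, measured).
-- A is a generator; it mutates nothing.

-- ===== PORT A =====
-- the inner 'for rule in rules: … break' loop of A, returning found_match
def lemmaExceptionsFound (w : List Char) (lemmas : List String) : List (String × String) → Bool
  | [] => false
  | rule :: rest =>
    if PySem.Chars.endswith w rule.1.toList then
      -- form = word[:-len(rule[0])] + rule[1]  (note word[:-0] is "" in Python, exactly as slice to -0 = 0 here)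
      let form := PySem.Chars.lower (PySem.List.slice w none (some (-(rule.1.toList.length : Int))) ++ rule.2.toList)
      if lemmas.any (fun lm => lm.toList == form) then true
      else lemmaExceptionsFound w lemmas rest
    else lemmaExceptionsFound w lemmas rest

def lemma_exceptions (words_with_lemmas : List (String × List String)) (rules : List (String × String)) : List (String × String) :=
  words_with_lemmas.foldl (fun out p =>
    if !lemmaExceptionsFound p.1.toList p.2 rules
        && !(PySem.Chars.lower p.1.toList == (PySem.List.pyGetD p.2 0 "").toList) then
      out ++ [(p.1, PySem.List.pyGetD p.2 0 "")]
    else out) []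

-- ===== PORT B =====
-- by_suffix: dict mapping a rule's old suffix to the set of its replacements
def lemmaIndex (rules : List (String × String)) : PySem.Dict (List Char) (PySem.Set (List Char)) :=
  rules.foldl (fun d r => d.modify r.1.toList [] (fun v => PySem.Set.add v r.2.toList)) PySem.Dict.empty

-- suffix_lens: the set of lengths of the rules' old suffixes
def lemmaLens (rules : List (String × String)) : PySem.Set Int :=
  PySem.Set.ofList (rules.map (fun r => (r.1.toList.length : Int)))

-- B's has_match: probe the dict with word[n-l:] for each rule suffix length l ≤ n
-- (the set is consumed by 'any', so Python's set-iteration order cannot affect the result)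
def lemmaExceptionsHasMatch (idx : PySem.Dict (List Char) (PySem.Set (List Char))) (lens : PySem.Set Int)
    (w : List Char) (lemmas : List String) : Bool :=
  lens.any fun l =>
    decide (l ≤ (w.length : Int)) &&
      ((idx.getD (PySem.List.slice w (some ((w.length : Int) - l)) none) []).any fun nw =>
        lemmas.any fun lm =>
          lm.toList == PySem.Chars.lower (PySem.List.slice w none (some (-l)) ++ nw))

def lemma_exceptions_alt (words_with_lemmas : List (String × List String)) (rules : List (String × String)) : List (String × String) :=
  let idx := lemmaIndex rules
  let lens := lemmaLens rules
  (words_with_lemmas.filter (fun p =>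
      !lemmaExceptionsHasMatch idx lens p.1.toList p.2
        && !(PySem.Chars.lower p.1.toList == (PySem.List.pyGetD p.2 0 "").toList))).map
    (fun p => (p.1, PySem.List.pyGetD p.2 0 ""))

-- ===== PRECONDITION & SPEC =====
-- Pre_ excludes exactly the inputs on which A raises: a word whose lemma list is empty makes A
-- (and B) evaluate lemmas[0], an IndexError.
def Pre_lemma_exceptions (words_with_lemmas : List (String × List String)) (rules : List (String × String)) : Prop :=
  ∀ p ∈ words_with_lemmas, p.2 ≠ []
instance (words_with_lemmas : List (String × List String)) (rules : List (String × String)) : Decidable (Pre_lemma_exceptions words_with_lemmas rules) := by unfold Pre_lemma_exceptions; infer_instance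

def pvWitness_lemma_exceptions : (List (String × List String)) × (List (String × String)) :=
  ([("Kissat", ["kissa"])], [("t", "")])

def Spec_lemma_exceptions (words_with_lemmas : List (String × List String)) (rules : List (String × String)) (out : List (String × String)) : Prop := out = lemma_exceptions_alt words_with_lemmas rules
instance (words_with_lemmas : List (String × List String)) (rules : List (String × String)) (out : List (String × String)) : Decidable (Spec_lemma_exceptions words_with_lemmas rules out) := by unfold Spec_lemma_exceptions; infer_instance

-- ===== CLAIM (what is proved, stated in full; the proofs are below) =====
def Claim_equal_lemma_exceptions : Prop := ∀ (words_with_lemmas : List (String × List String)) (rules : List (String × String)), Dom_lemma_exceptions words_with_lemmas rules → Pre_lemma_exceptions words_with_lemmas rules → Spec_lemma_exceptions words_with_lemmas rules (lemma_exceptions words_with_lemmas rules)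

-- ===== LEMMAS AND PROOFS =====

-- the membership test both programs perform on a candidate (old, new) rule, as one predicate
def lemmaCheck (w : List Char) (lemmas : List String) (o n : List Char) : Bool :=
  lemmas.any fun lm => lm.toList == PySem.Chars.lower (PySem.List.slice w none (some (-(o.length : Int))) ++ n)

theorem foundA_eq_any (w : List Char) (lemmas : List String) (rules : List (String × String)) :
    lemmaExceptionsFound w lemmas rules =
      rules.any (fun r => PySem.Chars.endswith w r.1.toList && lemmaCheck w lemmas r.1.toList r.2.toList) := by
  induction rules with
  | nil => rfl
  | cons r rest ih =>
    simp only [lemmaExceptionsFound, List.any_cons, lemmaCheck, ih]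
    by_cases h : PySem.Chars.endswith w r.1.toList
    · rw [if_pos h, h, Bool.true_and]
      split <;> rename_i hany
      · rw [hany, Bool.true_or]
      · rw [(Bool.not_eq_true _).mp hany, Bool.false_or]
    · rw [if_neg h, (Bool.not_eq_true _).mp h, Bool.false_and, Bool.false_or]

theorem getD_foldl_modify_setadd (l : List ((List Char) × (List Char)))
    (d : PySem.Dict (List Char) (PySem.Set (List Char))) (c : List Char) :
    (l.foldl (fun d p => d.modify p.1 [] (fun v => PySem.Set.add v p.2)) d).getD c [] =
      PySem.Set.update (d.getD c []) ((l.filter (fun p => p.1 == c)).map (·.2)) := by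
  induction l generalizing d with
  | nil => rfl
  | cons p l ih =>
    simp only [List.foldl_cons, ih, PySem.Dict.getD_modify, List.filter_cons]
    by_cases h : c = p.1
    · rw [if_pos h, if_pos (by simp [h])]
      subst h
      rfl
    · rw [if_neg h, if_neg (by simpa using fun hh : p.1 = c => h hh.symm)]

theorem lemmaIndex_getD (rules : List (String × String)) (s : List Char) :
    (lemmaIndex rules).getD s [] =
      PySem.Set.ofList (((rules.map (fun r => (r.1.toList, r.2.toList))).filter (fun p => p.1 == s)).map (·.2)) := by
  have h : lemmaIndex rules =
      (rules.map (fun r => (r.1.toList, r.2.toList))).foldl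
        (fun d p => d.modify p.1 [] (fun v => PySem.Set.add v p.2)) PySem.Dict.empty := by
    simp [lemmaIndex, List.foldl_map]
  rw [h, getD_foldl_modify_setadd]
  rfl

theorem suffix_eq_drop (l1 l2 : List Char) (h : l1 <:+ l2) : l2.drop (l2.length - l1.length) = l1 := by
  obtain ⟨t, rfl⟩ := h
  simp

theorem hasMatch_iff (w : List Char) (lemmas : List String) (rules : List (String × String)) :
    lemmaExceptionsHasMatch (lemmaIndex rules) (lemmaLens rules) w lemmas = true ↔
      ∃ r ∈ rules, PySem.Chars.endswith w r.1.toList = true ∧ lemmaCheck w lemmas r.1.toList r.2.toList = true := by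
  unfold lemmaExceptionsHasMatch
  simp only [List.any_eq_true, Bool.and_eq_true, decide_eq_true_eq, lemmaCheck]
  constructor
  · rintro ⟨l, hl, hln, nw, hnw, hchk⟩
    have hl0 : 0 ≤ l := by
      rw [lemmaLens, PySem.Set.mem_ofList, List.mem_map] at hl
      obtain ⟨r', _, rfl⟩ := hl
      positivity
    rw [PySem.List.slice_from w (by omega)] at hnw
    rw [lemmaIndex_getD] at hnw
    rw [PySem.Set.mem_ofList] at hnw
    obtain ⟨q, hqf, hq2⟩ := List.mem_map.mp hnw
    obtain ⟨hqm, hqs⟩ := List.mem_filter.mp hqf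
    obtain ⟨r, hr, rfl⟩ := List.mem_map.mp hqm
    have h1 : r.1.toList = w.drop ((w.length : Int) - l).toNat := by simpa using hqs
    have hlen : (r.1.toList.length : Int) = l := by
      rw [h1, List.length_drop]; omega
    refine ⟨r, hr, ?_, ?_⟩
    · rw [PySem.Chars.endswith_iff, h1]
      exact List.drop_suffix _ _
    · rw [hlen]
      simp only at hq2
      rw [hq2]; exact hchk
  · rintro ⟨r, hr, hsuf, hchk⟩
    have hs : r.1.toList <:+ w := (PySem.Chars.endswith_iff w r.1.toList).mp hsuf
    have hdrop := suffix_eq_drop _ _ hs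
    have hlen : r.1.toList.length ≤ w.length := hs.length_le
    refine ⟨(r.1.toList.length : Int), ?_, by omega, ?_⟩
    · rw [lemmaLens, PySem.Set.mem_ofList, List.mem_map]
      exact ⟨r, hr, rfl⟩
    · rw [PySem.List.slice_from w (by omega)]
      have hcast : ((w.length : Int) - (r.1.toList.length : Int)).toNat = w.length - r.1.toList.length := by omega
      rw [hcast, hdrop]
      refine ⟨r.2.toList, ?_, hchk⟩
      rw [lemmaIndex_getD]
      rw [PySem.Set.mem_ofList]
      simp only [List.mem_map, List.mem_filter, beq_iff_eq]
      exact ⟨(r.1.toList, r.2.toList), ⟨⟨r, hr, rfl⟩, rfl⟩, rfl⟩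

theorem found_eq (w : List Char) (lemmas : List String) (rules : List (String × String)) :
    lemmaExceptionsHasMatch (lemmaIndex rules) (lemmaLens rules) w lemmas = lemmaExceptionsFound w lemmas rules := by
  rw [foundA_eq_any, Bool.eq_iff_iff, hasMatch_iff, List.any_eq_true]
  simp [Bool.and_eq_true]

-- ===== VERDICT (by name: the statement is the Claim_ definition above) =====
theorem lemma_exceptions_spec : Claim_equal_lemma_exceptions := by
  intro wwl rules _ _
  unfold Spec_lemma_exceptions lemma_exceptions lemma_exceptions_alt
  have h := PySem.List.foldl_append_if
      (p := fun p : String × List String => !lemmaExceptionsFound p.1.toList p.2 rules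
          && !(PySem.Chars.lower p.1.toList == (PySem.List.pyGetD p.2 0 "").toList))
      (f := fun p : String × List String => (p.1, PySem.List.pyGetD p.2 0 ""))
      wwl []
  rw [h]
  simp only [List.nil_append, found_eq]
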